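-- pv_equiv track=rewrite | github.com/thanhvanvu/leetcode-practice | leetcode_problem/2300_successful_pairs_of_spells_and_potions/2300_successful_pairs_of_spells_and_potions.py | successfulPairs_bruteForce
-- ===== SOURCE A (Python) =====
-- def successfulPairs_bruteForce(spells, potions, success):
--     result = []
--     for s in spells:
--         count = 0
--         for p in potions:
--             product = s * p
--             if product >= success:
--                 count += 1
--         result.append(count)
--     return result
-- ===== SOURCE B (Python) =====
-- def successfulPairs_bruteForce(spells, potions, success):
--     sp = sorted(potions)
--     m = len(sp)
--
--     def bl(x):  # first index i with sp[i] >= x (hand-written bisect_left)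
--         lo, hi = 0, m
--         while lo < hi:
--             mid = (lo + hi) // 2
--             if sp[mid] < x:
--                 lo = mid + 1
--             else:
--                 hi = mid
--         return lo
--
--     def br(x):  # first index i with sp[i] > x (hand-written bisect_right)
--         lo, hi = 0, m
--         while lo < hi:
--             mid = (lo + hi) // 2
--             if sp[mid] <= x:
--                 lo = mid + 1
--             else:
--                 hi = mid
--         return lo
--
--     res = []
--     for s in spells:
--         if s > 0:
--             res.append(m - bl(-((-success) // s)))
--         elif s < 0:
--             res.append(br(success // s))
--         else:
--             res.append(m if success <= 0 else 0)
--     return res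
-- ===== Notes on version B (the rewrite author's own statement) =====
-- stated objective: faster
-- what changed: B sorts the potions once and answers each spell by binary-searching the ceiling/floor threshold (with sign split on the spell) instead of scanning all potions per spell.
import Mathlib
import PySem

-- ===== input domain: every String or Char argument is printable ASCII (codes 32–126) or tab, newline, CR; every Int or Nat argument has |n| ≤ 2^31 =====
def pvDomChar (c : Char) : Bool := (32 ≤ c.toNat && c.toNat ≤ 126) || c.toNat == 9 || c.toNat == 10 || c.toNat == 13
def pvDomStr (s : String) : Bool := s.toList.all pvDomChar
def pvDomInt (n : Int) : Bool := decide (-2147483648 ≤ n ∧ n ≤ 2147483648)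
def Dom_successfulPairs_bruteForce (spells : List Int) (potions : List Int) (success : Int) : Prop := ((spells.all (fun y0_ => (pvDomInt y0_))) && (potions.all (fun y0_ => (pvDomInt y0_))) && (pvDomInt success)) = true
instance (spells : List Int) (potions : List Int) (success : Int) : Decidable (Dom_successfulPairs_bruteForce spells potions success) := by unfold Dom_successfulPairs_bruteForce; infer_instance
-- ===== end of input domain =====

-- B sorts the potions once and answers each spell by a binary search for the
-- sign-dependent success threshold, instead of A's per-spell scan of all potions (objective: faster).

-- ===== PORT A =====
def successfulPairs_bruteForce (spells : List Int) (potions : List Int) (success : Int) : List Int :=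
  spells.foldl (fun result s =>
    result ++ [potions.foldl (fun count p =>
      let product := s * p
      if product ≥ success then count + 1 else count) 0]) []

-- ===== PORT B =====
-- hand-written bisect_left loop from Source B
-- (sp[mid] is ported as pyGetD with default 0: mid is always in range, so the value agrees exactly)
def pvBl (sp : List Int) (x : Int) (lo hi : Nat) : Nat :=
  if _h : lo < hi then
    let mid := (lo + hi) / 2
    if PySem.List.pyGetD sp (mid : Int) 0 < x then pvBl sp x (mid + 1) hi else pvBl sp x lo mid
  else lo
termination_by hi - lo
decreasing_by all_goals omega

-- hand-written bisect_right loop from Source B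
def pvBr (sp : List Int) (x : Int) (lo hi : Nat) : Nat :=
  if _h : lo < hi then
    let mid := (lo + hi) / 2
    if PySem.List.pyGetD sp (mid : Int) 0 ≤ x then pvBr sp x (mid + 1) hi else pvBr sp x lo mid
  else lo
termination_by hi - lo
decreasing_by all_goals omega

def successfulPairs_bruteForce_alt (spells : List Int) (potions : List Int) (success : Int) : List Int :=
  let sp := PySem.List.sorted potions (fun x => x) false
  let m := sp.length
  spells.foldl (fun res s =>
    if s > 0 then
      res ++ [(m : Int) - (pvBl sp (-(PySem.Int.floordiv (-success) s)) 0 m : Int)]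
    else if s < 0 then
      res ++ [(pvBr sp (PySem.Int.floordiv success s) 0 m : Int)]
    else
      res ++ [if success ≤ 0 then (m : Int) else 0]) []

-- ===== PRECONDITION & SPEC =====
def Spec_successfulPairs_bruteForce (spells : List Int) (potions : List Int) (success : Int) (out : List Int) : Prop := out = successfulPairs_bruteForce_alt spells potions success
instance (spells : List Int) (potions : List Int) (success : Int) (out : List Int) : Decidable (Spec_successfulPairs_bruteForce spells potions success out) := by unfold Spec_successfulPairs_bruteForce; infer_instance

-- ===== CLAIM (what is proved, stated in full; the proofs are below) =====
def Claim_equal_successfulPairs_bruteForce : Prop := ∀ (spells : List Int) (potions : List Int) (success : Int), Dom_successfulPairs_bruteForce spells potions success → Spec_successfulPairs_bruteForce spells potions success (successfulPairs_bruteForce spells potions success)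

-- ===== LEMMAS AND PROOFS =====

-- If the first n positions of sp satisfy p and the rest do not, countP p sp = n.
theorem pv_countP_split (sp : List Int) (p : Int → Bool) (n : Nat) (hn : n ≤ sp.length)
    (hlo : ∀ j (hj : j < sp.length), j < n → p sp[j])
    (hhi : ∀ j (hj : j < sp.length), n ≤ j → ¬ p sp[j]) :
    sp.countP p = n := by
  have h1 : (sp.take n).countP p = (sp.take n).length := by
    rw [List.countP_eq_length]
    intro a ha
    rw [List.mem_iff_getElem] at ha
    obtain ⟨i, hi, rfl⟩ := ha
    rw [List.getElem_take]
    have hlen : i < sp.length := by simp at hi; omega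
    exact hlo i hlen (by simp at hi; omega)
  have h2 : (sp.drop n).countP p = 0 := by
    rw [List.countP_eq_zero]
    intro a ha
    rw [List.mem_iff_getElem] at ha
    obtain ⟨i, hi, rfl⟩ := ha
    rw [List.getElem_drop]
    have hlen : n + i < sp.length := by simp at hi; omega
    exact hhi (n+i) hlen (by omega)
  have hsplit := List.take_append_drop n sp
  calc sp.countP p = ((sp.take n) ++ (sp.drop n)).countP p := by rw [hsplit]
    _ = n := by rw [List.countP_append, h1, h2]; simp [hn]

-- binary-search invariant for the bisect_left loop
theorem pvBl_spec (sp : List Int) (x : Int) (hs : sp.Pairwise (fun a b => a ≤ b)) :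
    ∀ lo hi, lo ≤ hi → hi ≤ sp.length →
    (∀ j (hj : j < sp.length), j < lo → sp[j] < x) →
    (∀ j (hj : j < sp.length), hi ≤ j → x ≤ sp[j]) →
    pvBl sp x lo hi = sp.countP (fun a => a < x) := by
  have hmono := List.pairwise_iff_getElem.1 hs
  intro lo hi
  induction hfuel : hi - lo using Nat.strong_induction_on generalizing lo hi with
  | _ fuel ih =>
  intro hle hhilen hlo hhi
  rw [pvBl]
  by_cases h : lo < hi
  · simp only [dif_pos h]
    have hmidlen : (lo + hi) / 2 < sp.length := by omega
    rw [PySem.List.pyGetD_eq_getElem sp 0 (by omega) (by exact_mod_cast hmidlen)]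
    simp only [Int.toNat_natCast]
    by_cases hc : sp[(lo + hi) / 2] < x
    · simp only [if_pos hc]
      refine ih (hi - ((lo + hi) / 2 + 1)) (by omega) _ _ rfl (by omega) hhilen ?_ hhi
      intro j hj hjlt
      rcases Nat.lt_or_ge j ((lo + hi) / 2) with hj' | hj'
      · exact lt_of_le_of_lt (hmono j _ hj hmidlen hj') hc
      · have : j = (lo + hi) / 2 := by omega
        subst this; exact hc
    · simp only [if_neg hc]
      push Not at hc
      refine ih ((lo + hi) / 2 - lo) (by omega) _ _ rfl (by omega) (by omega) hlo ?_
      intro j hj hjge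
      rcases Nat.lt_or_ge ((lo + hi) / 2) j with hj' | hj'
      · exact le_trans hc (hmono _ j hmidlen hj hj')
      · have : j = (lo + hi) / 2 := by omega
        subst this; exact hc
  · simp only [dif_neg h]
    have : lo = hi := by omega
    subst this
    symm
    refine pv_countP_split sp _ lo (by omega) ?_ ?_
    · intro j hj hjlt; exact decide_eq_true (hlo j hj hjlt)
    · intro j hj hjge
      simp only [decide_eq_true_eq]
      exact not_lt.2 (hhi j hj hjge)

-- binary-search invariant for the bisect_right loop
theorem pvBr_spec (sp : List Int) (x : Int) (hs : sp.Pairwise (fun a b => a ≤ b)) :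
    ∀ lo hi, lo ≤ hi → hi ≤ sp.length →
    (∀ j (hj : j < sp.length), j < lo → sp[j] ≤ x) →
    (∀ j (hj : j < sp.length), hi ≤ j → x < sp[j]) →
    pvBr sp x lo hi = sp.countP (fun a => a ≤ x) := by
  have hmono := List.pairwise_iff_getElem.1 hs
  intro lo hi
  induction hfuel : hi - lo using Nat.strong_induction_on generalizing lo hi with
  | _ fuel ih =>
  intro hle hhilen hlo hhi
  rw [pvBr]
  by_cases h : lo < hi
  · simp only [dif_pos h]
    have hmidlen : (lo + hi) / 2 < sp.length := by omega
    rw [PySem.List.pyGetD_eq_getElem sp 0 (by omega) (by exact_mod_cast hmidlen)]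
    simp only [Int.toNat_natCast]
    by_cases hc : sp[(lo + hi) / 2] ≤ x
    · simp only [if_pos hc]
      refine ih (hi - ((lo + hi) / 2 + 1)) (by omega) _ _ rfl (by omega) hhilen ?_ hhi
      intro j hj hjlt
      rcases Nat.lt_or_ge j ((lo + hi) / 2) with hj' | hj'
      · exact le_trans (hmono j _ hj hmidlen hj') hc
      · have : j = (lo + hi) / 2 := by omega
        subst this; exact hc
    · simp only [if_neg hc]
      push Not at hc
      refine ih ((lo + hi) / 2 - lo) (by omega) _ _ rfl (by omega) (by omega) hlo ?_
      intro j hj hjge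
      rcases Nat.lt_or_ge ((lo + hi) / 2) j with hj' | hj'
      · exact lt_of_lt_of_le hc (hmono _ j hmidlen hj hj')
      · have : j = (lo + hi) / 2 := by omega
        subst this; exact hc
  · simp only [dif_neg h]
    have : lo = hi := by omega
    subst this
    symm
    refine pv_countP_split sp _ lo (by omega) ?_ ?_
    · intro j hj hjlt; exact decide_eq_true (hlo j hj hjlt)
    · intro j hj hjge
      simp only [decide_eq_true_eq]
      exact not_le.2 (hhi j hj hjge)

theorem pv_count_not (l : List Int) (p : Int → Bool) :
    l.countP p + l.countP (fun a => !(p a)) = l.length := by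
  induction l with
  | nil => rfl
  | cons h t ih => by_cases hp : p h <;> simp [hp] <;> omega

-- per-spell agreement: A's inner scan equals B's binary-search expression
theorem pv_cell (potions : List Int) (success s : Int) :
    (potions.foldl (fun count p =>
      let product := s * p
      if product ≥ success then count + 1 else count) (0 : Int)) =
    (let sp := PySem.List.sorted potions (fun x => x) false
     let m := sp.length
     if s > 0 then (m : Int) - (pvBl sp (-(PySem.Int.floordiv (-success) s)) 0 m : Int)
     else if s < 0 then (pvBr sp (PySem.Int.floordiv success s) 0 m : Int)
     else if success ≤ 0 then (m : Int) else 0) := by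
  simp only []
  set sp := PySem.List.sorted potions (fun x => x) false with hspdef
  have hperm : sp.Perm potions := PySem.List.sorted_perm potions (fun x => x) false
  have hpair : sp.Pairwise (fun a b => a ≤ b) := PySem.List.sorted_pairwise potions (fun x => x)
  have hlhs : (potions.foldl (fun count p =>
      let product := s * p
      if product ≥ success then count + 1 else count) (0 : Int))
      = (sp.countP (fun p => decide (success ≤ s * p)) : Int) := by
    have := PySem.List.foldl_ite_add_one (fun p => success ≤ s * p) potions 0
    simp only [ge_iff_le] at this ⊢
    rw [this, hperm.countP_eq, zero_add]
  rw [hlhs]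
  rcases lt_trichotomy s 0 with hneg | hzero | hpos
  · rw [if_neg (by omega), if_pos hneg]
    set f := PySem.Int.floordiv success s with hf
    have hf2 : PySem.Int.floordiv (-success) (-s) = f := by rw [PySem.Int.floordiv_neg_neg]
    obtain ⟨h1, h2⟩ := (PySem.Int.floordiv_eq_iff_of_pos (a := -success) (b := -s) (by omega)).1 hf2
    rw [pvBr_spec sp f hpair 0 sp.length (by omega) le_rfl
        (by intro j hj hj0; omega) (by intro j hj hjge; omega)]
    congr 1
    apply List.countP_congr
    intro a _
    simp only [decide_eq_true_eq]
    constructor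
    · intro h; nlinarith
    · intro h; by_contra hc; push Not at hc; nlinarith
  · subst hzero
    rw [if_neg (by omega), if_neg (by omega)]
    by_cases hsuc : success ≤ 0
    · rw [if_pos hsuc]
      have : sp.countP (fun p => decide (success ≤ 0 * p)) = sp.length := by
        rw [List.countP_eq_length]; intro a _; simpa using hsuc
      rw [this]
    · rw [if_neg hsuc]
      have : sp.countP (fun p => decide (success ≤ 0 * p)) = 0 := by
        rw [List.countP_eq_zero]; intro a _; simpa using hsuc
      rw [this]; rfl
  · rw [if_pos hpos]
    set t := -(PySem.Int.floordiv (-success) s) with ht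
    have hft : PySem.Int.floordiv (-success) s = -t := by omega
    obtain ⟨h1, h2⟩ := (PySem.Int.floordiv_eq_iff_of_pos (a := -success) (b := s) hpos).1 hft
    rw [pvBl_spec sp t hpair 0 sp.length (by omega) le_rfl
        (by intro j hj hj0; omega) (by intro j hj hjge; omega)]
    have hsplit := pv_count_not sp (fun a => decide (a < t))
    have hcong : sp.countP (fun a => !(decide (a < t))) = sp.countP (fun p => decide (success ≤ s * p)) := by
      apply List.countP_congr
      intro a _
      simp only [Bool.not_eq_true', decide_eq_false_iff_not, not_lt, decide_eq_true_eq]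
      constructor
      · intro h; nlinarith
      · intro h; by_contra hc; push Not at hc; nlinarith
    omega

-- ===== VERDICT (by name: the statement is the Claim_ definition above) =====
theorem successfulPairs_bruteForce_spec : Claim_equal_successfulPairs_bruteForce := by
  intro spells potions success hdom
  clear hdom
  unfold Spec_successfulPairs_bruteForce
  unfold successfulPairs_bruteForce successfulPairs_bruteForce_alt
  simp only []
  suffices h : ∀ acc : List Int,
      spells.foldl (fun result s =>
        result ++ [potions.foldl (fun count p =>
          let product := s * p
          if product ≥ success then count + 1 else count) 0]) acc =
      spells.foldl (fun res s =>
        if s > 0 then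
          res ++ [((PySem.List.sorted potions (fun x => x) false).length : Int) - (pvBl (PySem.List.sorted potions (fun x => x) false) (-(PySem.Int.floordiv (-success) s)) 0 (PySem.List.sorted potions (fun x => x) false).length : Int)]
        else if s < 0 then
          res ++ [(pvBr (PySem.List.sorted potions (fun x => x) false) (PySem.Int.floordiv success s) 0 (PySem.List.sorted potions (fun x => x) false).length : Int)]
        else
          res ++ [if success ≤ 0 then ((PySem.List.sorted potions (fun x => x) false).length : Int) else 0]) acc from h []
  induction spells with
  | nil => intro acc; rfl
  | cons s rest ih =>
    intro acc
    simp only [List.foldl_cons]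
    have hstep : (if s > 0 then
          acc ++ [((PySem.List.sorted potions (fun x => x) false).length : Int) - (pvBl (PySem.List.sorted potions (fun x => x) false) (-(PySem.Int.floordiv (-success) s)) 0 (PySem.List.sorted potions (fun x => x) false).length : Int)]
        else if s < 0 then
          acc ++ [(pvBr (PySem.List.sorted potions (fun x => x) false) (PySem.Int.floordiv success s) 0 (PySem.List.sorted potions (fun x => x) false).length : Int)]
        else
          acc ++ [if success ≤ 0 then ((PySem.List.sorted potions (fun x => x) false).length : Int) else 0])
        = acc ++ [potions.foldl (fun count p =>
          let product := s * p
          if product ≥ success then count + 1 else count) 0] := by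
      rw [pv_cell potions success s]
      simp only []
      split_ifs <;> rfl
    rw [hstep, ih]
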